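-- pv_equiv track=rewrite | github.com/leo-t-1/CipherProbe | cipherprobe.py | zigzag_prime_enc
-- ===== SOURCE A (Python) =====
-- import string
--
-- def nth_prime(n):
--     """Return the nth prime (0-indexed: 2,3,5,7,11,...)."""
--     primes = []
--     c = 2
--     while len(primes) <= n:
--         if all(c % p for p in primes if p * p <= c):
--             primes.append(c)
--         c += 1
--     return primes[n]
--
-- def shift_char(ch, amount):
--     """Shift a letter by `amount`, preserving case. Non-letters pass through."""
--     if ch in string.ascii_lowercase:
--         return chr((ord(ch) - ord('a') + amount) % 26 + ord('a'))
--     if ch in string.ascii_uppercase: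
--         return chr((ord(ch) - ord('A') + amount) % 26 + ord('A'))
--     return ch
--
-- def zigzag_prime_enc(text, rails=4):
--     if not text:
--         return text
--     rows = [[] for _ in range(rails)]
--     rail, direction = 0, 1
--     for ch in text:
--         rows[rail].append(ch)
--         if rail == 0:
--             direction = 1
--         elif rail == rails - 1:
--             direction = -1
--         rail += direction
--
--     flat = ''.join(''.join(r) for r in rows)
--
--     result = []
--     for i, ch in enumerate(flat):
--         if ch.isalpha():
--             result.append(shift_char(ch, nth_prime(i)))
--         else:
--             result.append(ch)
--     return ''.join(result)
-- ===== SOURCE B (Python) =====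
-- def _first_primes(n):
--     """The first n primes, built once with an incremental trial-division list."""
--     primes = []
--     c = 2
--     while len(primes) < n:
--         if all(c % p for p in primes if p * p <= c):
--             primes.append(c)
--         c += 1
--     return primes
--
-- def _shift(ch, k):
--     if 'a' <= ch <= 'z':
--         return chr((ord(ch) - 97 + k) % 26 + 97)
--     if 'A' <= ch <= 'Z':
--         return chr((ord(ch) - 65 + k) % 26 + 65)
--     return ch
--
-- def zigzag_prime_enc(text, rails=4):
--     if not text:
--         return text
--     n = len(text)
--     if rails >= 2:
--         period = 2 * (rails - 1)
--         def row(i):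
--             m = i % period
--             return min(m, period - m)
--         order = sorted(range(n), key=lambda i: (row(i), i))
--         flat = ''.join(text[i] for i in order)
--     else:
--         flat = text
--     primes = _first_primes(n)
--     return ''.join(_shift(ch, k) for ch, k in zip(flat, primes))
-- ===== Notes on version B (the rewrite author's own statement) =====
-- stated objective: faster
-- what changed: B computes the first n primes once with a single incremental trial-division pass and zips them with the flattened text, and produces the zigzag order by sorting the indices on a closed-form row formula instead of simulating the rail walk; A reruns the whole prime generator from scratch for every character.
import Mathlib
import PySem

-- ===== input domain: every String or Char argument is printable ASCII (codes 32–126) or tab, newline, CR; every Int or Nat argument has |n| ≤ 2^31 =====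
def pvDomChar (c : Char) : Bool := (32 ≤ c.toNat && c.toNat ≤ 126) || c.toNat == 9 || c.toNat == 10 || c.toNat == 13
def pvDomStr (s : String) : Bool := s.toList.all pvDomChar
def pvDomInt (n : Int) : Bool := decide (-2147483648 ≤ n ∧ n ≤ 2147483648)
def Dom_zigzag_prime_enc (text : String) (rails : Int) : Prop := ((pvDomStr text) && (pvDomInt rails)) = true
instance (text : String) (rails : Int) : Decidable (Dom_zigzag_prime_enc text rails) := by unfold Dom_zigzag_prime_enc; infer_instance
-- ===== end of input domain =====

-- B computes the first n primes once (one incremental trial-division pass) and obtains the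
-- zigzag order by sorting indices on a closed-form row formula; A reruns its prime generator
-- from scratch for every character and simulates the rail walk step by step.

-- ===== PORT A =====
-- Both Pythons run the same candidate loop "append c if no known prime p with p*p<=c divides c".
-- pvGen is that loop made total with fuel (proved sufficient below: 2^(t+1) candidates reach
-- the t-th prime); A stops at target n+1 primes, B at target n.
def pvTrial (primes : List Nat) (c : Nat) : Bool :=
  (primes.filter (fun p => decide (p * p ≤ c))).all (fun p => decide (c % p ≠ 0))

def pvGen (fuel : Nat) (target : Nat) (primes : List Nat) (c : Nat) : List Nat :=
  match fuel with
  | 0 => primes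
  | fuel + 1 =>
    if primes.length < target then
      pvGen fuel target (if pvTrial primes c then primes ++ [c] else primes) (c + 1)
    else primes

def nth_prime (n : Nat) : Nat :=
  (pvGen (2 ^ (n + 2)) (n + 1) [] 2).getD n 0   -- primes[n]; the loop stops with n+1 primes

def pvLowercase : List Char :=
  ['a','b','c','d','e','f','g','h','i','j','k','l','m','n','o','p','q','r','s','t','u','v','w','x','y','z']
def pvUppercase : List Char :=
  ['A','B','C','D','E','F','G','H','I','J','K','L','M','N','O','P','Q','R','S','T','U','V','W','X','Y','Z']

def shift_char (ch : Char) (amount : Nat) : Char :=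
  if ch ∈ pvLowercase then Char.ofNat ((ch.toNat - 'a'.toNat + amount) % 26 + 'a'.toNat)
  else if ch ∈ pvUppercase then Char.ofNat ((ch.toNat - 'A'.toNat + amount) % 26 + 'A'.toNat)
  else ch

-- one iteration of A's rail walk: rows[rail].append(ch); direction update; rail += direction
-- (rows[rail] is in range whenever Python does not raise, i.e. on Pre_)
def pvZigStep (rails : Int) (st : List (List Char) × Int × Int) (ch : Char) :
    List (List Char) × Int × Int :=
  let rows := st.1
  let rail := st.2.1
  let direction := st.2.2
  let rows' := rows.set rail.toNat (rows.getD rail.toNat [] ++ [ch])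
  let direction' := if rail = 0 then 1 else if rail = rails - 1 then -1 else direction
  (rows', rail + direction', direction')

def zigzag_prime_enc (text : String) (rails : Int) : String :=
  if text.toList = [] then text
  else
    let st := text.toList.foldl (pvZigStep rails) (List.replicate rails.toNat [], 0, 1)
    let flat : List Char := st.1.flatten
    String.mk ((PySem.List.enumerate flat).map (fun p =>
      if PySem.Chars.isalpha p.2 then shift_char p.2 (nth_prime p.1.toNat) else p.2))

-- ===== PORT B =====
def first_primes (n : Nat) : List Nat := pvGen (2 ^ (n + 1)) n [] 2

def pvShift (ch : Char) (k : Nat) : Char :=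
  if 'a' ≤ ch ∧ ch ≤ 'z' then Char.ofNat ((ch.toNat - 97 + k) % 26 + 97)
  else if 'A' ≤ ch ∧ ch ≤ 'Z' then Char.ofNat ((ch.toNat - 65 + k) % 26 + 65)
  else ch

def pvRow (period i : Int) : Int :=
  let m := PySem.Int.mod i period
  min m (period - m)

def zigzag_prime_enc_alt (text : String) (rails : Int) : String :=
  if text.toList = [] then text
  else
    let flat : List Char :=
      if 2 ≤ rails then
        let period := 2 * (rails - 1)
        let order := PySem.List.sorted2 (PySem.List.pyRange 0 (text.toList.length : Int))
          (fun i => pvRow period i) (fun i => i)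
        order.map (fun i => PySem.List.pyGetD text.toList i ' ')   -- text[i], i from range(n)
      else text.toList
    String.mk ((flat.zip (first_primes text.toList.length)).map (fun p => pvShift p.1 p.2))

-- ===== PRECONDITION & SPEC =====
-- Pre_ excludes exactly the inputs on which Python A raises IndexError (its rail walk indexes
-- past the row list): nonempty text with rails < 2, except a single character with rails = 1.
def Pre_zigzag_prime_enc (text : String) (rails : Int) : Prop :=
  text.toList = [] ∨ 2 ≤ rails ∨ (text.toList.length = 1 ∧ rails = 1)
instance (text : String) (rails : Int) : Decidable (Pre_zigzag_prime_enc text rails) := by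
  unfold Pre_zigzag_prime_enc; infer_instance

def pvWitness_zigzag_prime_enc : String × Int := ("Attack at dawn!", 3)

def Spec_zigzag_prime_enc (text : String) (rails : Int) (out : String) : Prop :=
  out = zigzag_prime_enc_alt text rails
instance (text : String) (rails : Int) (out : String) : Decidable (Spec_zigzag_prime_enc text rails out) := by
  unfold Spec_zigzag_prime_enc; infer_instance

-- ===== CLAIM (what is proved, stated in full; the proofs are below) =====
def Claim_equal_zigzag_prime_enc : Prop :=
  ∀ (text : String) (rails : Int), Dom_zigzag_prime_enc text rails →
    Pre_zigzag_prime_enc text rails →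
    Spec_zigzag_prime_enc text rails (zigzag_prime_enc text rails)

-- ===== LEMMAS AND PROOFS =====

----------------------------------------------------------------
-- Primes: the shared candidate loop produces Nat.nth Nat.Prime
----------------------------------------------------------------

def pvInv (primes : List Nat) (c : Nat) : Prop :=
  2 ≤ c ∧ primes = (List.range (Nat.count Nat.Prime c)).map (Nat.nth Nat.Prime)

lemma count_prime_two : Nat.count Nat.Prime 2 = 0 := by
  rw [show (2 : ℕ) = 0 + 1 + 1 from rfl, Nat.count_succ, Nat.count_succ, Nat.count_zero]
  simp [Nat.not_prime_zero, Nat.not_prime_one]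

lemma pvInv_init : pvInv [] 2 := by
  refine ⟨le_rfl, ?_⟩
  rw [count_prime_two]
  simp

lemma pvInv_mem {primes : List Nat} {c : Nat} (h : pvInv primes c) (p : Nat) :
    p ∈ primes ↔ Nat.Prime p ∧ p < c := by
  rw [h.2]
  simp only [List.mem_map, List.mem_range]
  constructor
  · rintro ⟨i, hi, rfl⟩
    refine ⟨Nat.nth_mem_of_infinite Nat.infinite_setOf_prime i, ?_⟩
    by_contra hge
    push_neg at hge
    have h1 : Nat.count Nat.Prime c ≤ Nat.count Nat.Prime (Nat.nth Nat.Prime i) :=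
      Nat.count_monotone _ hge
    have h2 : Nat.count Nat.Prime (Nat.nth Nat.Prime i) = i :=
      Nat.count_nth (fun hf => absurd hf Nat.infinite_setOf_prime)
    omega
  · rintro ⟨hp, hlt⟩
    refine ⟨Nat.count Nat.Prime p, ?_, Nat.nth_count hp⟩
    have h1 : Nat.count Nat.Prime (p + 1) ≤ Nat.count Nat.Prime c := Nat.count_monotone _ (by omega)
    rw [Nat.count_succ, if_pos hp] at h1
    omega

lemma pvTrial_eq {primes : List Nat} {c : Nat} (h : pvInv primes c) :
    pvTrial primes c = true ↔ Nat.Prime c := by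
  have h2c := h.1
  simp only [pvTrial, List.all_eq_true, List.mem_filter, decide_eq_true_eq, and_imp]
  constructor
  · intro hall
    by_contra hnp
    have hqp : Nat.Prime c.minFac := Nat.minFac_prime (by omega)
    have hqq : c.minFac * c.minFac ≤ c := by
      have := Nat.minFac_sq_le_self (by omega : 0 < c) hnp
      simpa [pow_two] using this
    have hq2 : 2 ≤ c.minFac := hqp.two_le
    have hqc : c.minFac < c := by nlinarith
    have hmem : c.minFac ∈ primes := (pvInv_mem h c.minFac).2 ⟨hqp, hqc⟩
    have hm0 : c % c.minFac = 0 := Nat.eq_zero_of_dvd_of_lt (Nat.minFac_dvd c) |> fun _ => Nat.mod_eq_zero_of_dvd (Nat.minFac_dvd c)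
    exact hall c.minFac hmem hqq hm0
  · intro hc p hp hple hmod
    obtain ⟨hpp, hplt⟩ := (pvInv_mem h p).1 hp
    have hdvd : p ∣ c := Nat.dvd_of_mod_eq_zero hmod
    rcases Nat.Prime.eq_one_or_self_of_dvd hc p hdvd with h1 | h1
    · exact absurd h1 hpp.ne_one
    · omega

lemma pvInv_step {primes : List Nat} {c : Nat} (h : pvInv primes c) :
    pvInv (if pvTrial primes c then primes ++ [c] else primes) (c + 1) := by
  by_cases ht : pvTrial primes c
  · have hc : Nat.Prime c := (pvTrial_eq h).1 ht
    rw [if_pos ht]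
    refine ⟨by have := h.1; omega, ?_⟩
    rw [Nat.count_succ, if_pos hc, List.range_succ, List.map_append, ← h.2]
    simp [Nat.nth_count hc]
  · have hc : ¬ Nat.Prime c := fun hp => ht ((pvTrial_eq h).2 hp)
    rw [if_neg ht]
    exact ⟨by have := h.1; omega, by rw [Nat.count_succ, if_neg hc]; exact h.2⟩

lemma pvInv_length {primes : List Nat} {c : Nat} (h : pvInv primes c) :
    primes.length = Nat.count Nat.Prime c := by rw [h.2]; simp

lemma pvGen_eq : ∀ (fuel t : Nat) (primes : List Nat) (c : Nat), pvInv primes c →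
    Nat.nth Nat.Prime t ≤ c + fuel →
    pvGen fuel t primes c
      = (List.range (max t (Nat.count Nat.Prime c))).map (Nat.nth Nat.Prime) := by
  intro fuel
  induction fuel with
  | zero =>
    intro t primes c h hf
    have h1 : Nat.count Nat.Prime (Nat.nth Nat.Prime t) = t :=
      Nat.count_nth (fun hfin => absurd hfin Nat.infinite_setOf_prime)
    have h2 : t ≤ Nat.count Nat.Prime c := by
      calc t = Nat.count Nat.Prime (Nat.nth Nat.Prime t) := h1.symm
        _ ≤ Nat.count Nat.Prime c := Nat.count_monotone _ (by omega)
    rw [pvGen, h.2, max_eq_right h2]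
  | succ fuel ih =>
    intro t primes c h hf
    rw [pvGen]
    by_cases hl : primes.length < t
    · rw [if_pos hl]
      have hlen := pvInv_length h
      have hcc : Nat.count Nat.Prime (c + 1) ≤ Nat.count Nat.Prime c + 1 := by
        rw [Nat.count_succ]; split_ifs <;> omega
      rw [ih t _ (c + 1) (pvInv_step h) (by omega)]
      have hmax : max t (Nat.count Nat.Prime (c + 1)) = max t (Nat.count Nat.Prime c) := by omega
      rw [hmax]
    · rw [if_neg hl]
      have hlen := pvInv_length h
      rw [h.2, max_eq_right (by omega)]

lemma nth_prime_zero : Nat.nth Nat.Prime 0 = 2 := by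
  have h := Nat.nth_count (p := Nat.Prime) (by norm_num : Nat.Prime 2)
  rwa [count_prime_two] at h

lemma nth_prime_le_pow (k : Nat) : Nat.nth Nat.Prime k ≤ 2 ^ (k + 1) := by
  induction k with
  | zero => rw [nth_prime_zero]; norm_num
  | succ k ih =>
    have hprime : Nat.Prime (Nat.nth Nat.Prime k) :=
      Nat.nth_mem_of_infinite Nat.infinite_setOf_prime k
    obtain ⟨q, hq, hlt, hle⟩ :=
      Nat.exists_prime_lt_and_le_two_mul (Nat.nth Nat.Prime k) (by have := hprime.two_le; omega)
    have h1 : Nat.nth Nat.Prime (k + 1) ≤ q := by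
      by_contra hgt
      push_neg at hgt
      have hjq : Nat.nth Nat.Prime (Nat.count Nat.Prime q) = q := Nat.nth_count hq
      have ha : k < Nat.count Nat.Prime q := by
        have := (Nat.nth_lt_nth Nat.infinite_setOf_prime
          (k := k) (n := Nat.count Nat.Prime q)).1 (by rw [hjq]; exact hlt)
        omega
      have hb : Nat.count Nat.Prime q < k + 1 := by
        have := (Nat.nth_lt_nth Nat.infinite_setOf_prime
          (k := Nat.count Nat.Prime q) (n := k + 1)).1 (by rw [hjq]; exact hgt)
        omega
      omega
    have hpow : (2 : ℕ) ^ (k + 1 + 1) = 2 * 2 ^ (k + 1) := by ring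
    omega

lemma nth_prime_eq (n : Nat) : nth_prime n = Nat.nth Nat.Prime n := by
  unfold nth_prime
  rw [pvGen_eq _ _ _ _ pvInv_init (by
    have h1 := nth_prime_le_pow (n + 1)
    have h2 : (2:ℕ) ^ (n + 1 + 1) = 2 ^ (n + 2) := by ring
    omega)]
  rw [count_prime_two, max_eq_left (by omega)]
  rw [List.getD_eq_getElem _ _ (by simp)]
  simp

lemma first_primes_eq (n : Nat) : first_primes n = (List.range n).map (Nat.nth Nat.Prime) := by
  unfold first_primes
  rw [pvGen_eq _ _ _ _ pvInv_init (by have := nth_prime_le_pow n; omega)]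
  rw [count_prime_two, max_eq_left (by omega)]

----------------------------------------------------------------
-- Character shifting: A's class tests agree with B's
----------------------------------------------------------------

lemma char_toNat_injective : Function.Injective Char.toNat := by
  intro a b h
  exact Char.ext (UInt32.toNat_inj.1 h)

lemma lower_toNat : pvLowercase.map Char.toNat =
    [97,98,99,100,101,102,103,104,105,106,107,108,109,110,111,112,113,114,115,116,117,118,119,120,121,122] := by
  decide

lemma upper_toNat : pvUppercase.map Char.toNat =
    [65,66,67,68,69,70,71,72,73,74,75,76,77,78,79,80,81,82,83,84,85,86,87,88,89,90] := by
  decide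

lemma mem_lower (c : Char) : c ∈ pvLowercase ↔ (97 ≤ c.toNat ∧ c.toNat ≤ 122) := by
  rw [← List.mem_map_of_injective char_toNat_injective, lower_toNat]
  simp only [List.mem_cons, List.not_mem_nil, or_false]
  omega

lemma mem_upper (c : Char) : c ∈ pvUppercase ↔ (65 ≤ c.toNat ∧ c.toNat ≤ 90) := by
  rw [← List.mem_map_of_injective char_toNat_injective, upper_toNat]
  simp only [List.mem_cons, List.not_mem_nil, or_false]
  omega

lemma char_le_iff (a b : Char) : a ≤ b ↔ a.toNat ≤ b.toNat := by
  rw [Char.le_def]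
  exact UInt32.le_iff_toNat_le

lemma shift_eq (ch : Char) (k : Nat) :
    (if PySem.Chars.isalpha ch then shift_char ch k else ch) = pvShift ch k := by
  unfold pvShift shift_char
  have ca : 'a'.toNat = 97 := rfl
  have cz : 'z'.toNat = 122 := rfl
  have cA : 'A'.toNat = 65 := rfl
  have cZ : 'Z'.toNat = 90 := rfl
  simp only [PySem.Chars.isalpha, PySem.Chars.islower, PySem.Chars.isupper,
    Bool.or_eq_true, Bool.and_eq_true, decide_eq_true_eq,
    mem_lower, mem_upper, char_le_iff, ca, cz, cA, cZ]
  split_ifs <;> first | rfl | omega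

----------------------------------------------------------------
-- Stage 2: A's enumerate/nth_prime pass equals B's zip pass
----------------------------------------------------------------

lemma stage2 (flat : List Char) (n : Nat) (hn : flat.length = n) :
    (PySem.List.enumerate flat).map (fun p =>
        if PySem.Chars.isalpha p.2 then shift_char p.2 (nth_prime p.1.toNat) else p.2)
    = (flat.zip (first_primes n)).map (fun p => pvShift p.1 p.2) := by
  apply List.ext_getElem
  · simp [PySem.List.length_enumerate, first_primes_eq, hn]
  · intro i h1 h2
    have hi : i < flat.length := by simpa [PySem.List.length_enumerate] using h1
    rw [List.getElem_map, List.getElem_map, PySem.List.getElem_enumerate, List.getElem_zip]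
    simp only [first_primes_eq, List.getElem_map, List.getElem_range, zero_add, Int.toNat_natCast]
    rw [nth_prime_eq]
    exact shift_eq flat[i] (Nat.nth Nat.Prime i)

----------------------------------------------------------------
-- Zigzag: closed form for A's rail walk
----------------------------------------------------------------

def pvRowN (R k : Nat) : Nat := min (k % (2 * (R - 1))) (2 * (R - 1) - k % (2 * (R - 1)))
def pvDirN (R k : Nat) : Int := if k % (2 * (R - 1)) < R - 1 then 1 else -1
def pvDirP (R k : Nat) : Int := if k = 0 then 1 else pvDirN R (k - 1)

lemma pvMod_succ (T k : Nat) (h : 2 ≤ T) :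
    (k + 1) % T = if k % T + 1 = T then 0 else k % T + 1 := by
  have h2 : k % T < T := Nat.mod_lt _ (by omega)
  rw [Nat.add_mod, Nat.mod_eq_of_lt (show 1 < T by omega)]
  split_ifs with hc
  · rw [hc, Nat.mod_self]
  · generalize hg : k % T = m at hc h2 ⊢
    exact Nat.mod_eq_of_lt (by omega)

lemma pvMod_pred (T k : Nat) (h : 2 ≤ T) (h2 : k % T ≠ 0) : (k - 1) % T = k % T - 1 := by
  have hk : k ≠ 0 := by
    intro hk; rw [hk] at h2; exact h2 (Nat.zero_mod T)
  have hs := pvMod_succ T (k - 1) h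
  rw [Nat.sub_add_cancel (by omega)] at hs
  split_ifs at hs with hc
  · exact absurd hs h2
  · generalize hg1 : (k - 1) % T = a at hs ⊢
    generalize hg2 : k % T = b at hs h2 ⊢
    omega

lemma pvRowN_lt (R k : Nat) (hR : 2 ≤ R) : pvRowN R k < R := by
  unfold pvRowN
  have h2 : k % (2 * (R - 1)) < 2 * (R - 1) := Nat.mod_lt _ (by omega)
  generalize hg : k % (2 * (R - 1)) = m at h2 ⊢
  omega

lemma pvRow_step (R k : Nat) (hR : 2 ≤ R) :
    (pvRowN R (k + 1) : Int) = (pvRowN R k : Int) + pvDirN R k := by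
  have hT : 2 ≤ 2 * (R - 1) := by omega
  unfold pvRowN pvDirN
  rw [pvMod_succ _ _ hT]
  have h2 : k % (2 * (R - 1)) < 2 * (R - 1) := Nat.mod_lt _ (by omega)
  generalize hg : k % (2 * (R - 1)) = m at h2 ⊢
  split_ifs <;> omega

lemma pvDir_step (R k : Nat) (hR : 2 ≤ R) :
    (if (pvRowN R k : Int) = 0 then 1
     else if (pvRowN R k : Int) = (R : Int) - 1 then -1 else pvDirP R k) = pvDirN R k := by
  have hT : 2 ≤ 2 * (R - 1) := by omega
  have h2 : k % (2 * (R - 1)) < 2 * (R - 1) := Nat.mod_lt _ (by omega)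
  by_cases hm : k % (2 * (R - 1)) = 0
  · unfold pvRowN pvDirN pvDirP
    generalize hg : (k - 1) % (2 * (R - 1)) = w
    generalize hg2 : k % (2 * (R - 1)) = m at hm h2 ⊢
    split_ifs <;> omega
  · have hk0 : k ≠ 0 := by
      intro hk; rw [hk] at hm; exact hm (Nat.zero_mod _)
    unfold pvRowN pvDirP
    rw [if_neg hk0]
    unfold pvDirN
    rw [pvMod_pred _ _ hT hm]
    generalize hg2 : k % (2 * (R - 1)) = m at hm h2 ⊢
    split_ifs <;> omega

lemma mapRange_getD {α : Type} (f : Nat → α) (R r : Nat) (d : α) (hr : r < R) :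
    ((List.range R).map f).getD r d = f r := by
  rw [List.getD_eq_getElem _ _ (by simpa using hr)]
  simp

lemma mapRange_set {α : Type} (f : Nat → α) (R r : Nat) (v : α) :
    ((List.range R).map f).set r v = (List.range R).map (fun j => if j = r then v else f j) := by
  apply List.ext_getElem
  · simp
  · intro i h1 h2
    simp only [List.getElem_set, List.getElem_map, List.getElem_range]
    by_cases h : r = i
    · subst h; simp
    · rw [if_neg h, if_neg (by omega)]

lemma zig_loop (l : List Char) (R : Nat) (hR : 2 ≤ R) :
    ∀ k, k ≤ l.length →
    (l.take k).foldl (pvZigStep (R : Int)) (List.replicate R [], 0, 1)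
      = ((List.range R).map (fun r =>
            ((List.range k).filter (fun i => pvRowN R i == r)).map (fun i => l.getD i ' ')),
         (pvRowN R k : Int), pvDirP R k) := by
  intro k
  induction k with
  | zero =>
    intro _
    simp only [List.take_zero, List.foldl_nil, List.range_zero, List.filter_nil, List.map_nil]
    have hrow : pvRowN R 0 = 0 := by
      unfold pvRowN
      simp
    rw [hrow]
    have hmap : (List.range R).map (fun _ : Nat => ([] : List Char)) = List.replicate R [] := by
      rw [List.map_const']
      simp
    rw [hmap]
    rfl
  | succ k ih =>
    intro hk1
    have hk : k < l.length := hk1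
    rw [List.take_succ, List.getElem?_eq_getElem hk]
    simp only [Option.toList_some]
    rw [List.foldl_append, ih (le_of_lt hk), List.foldl_cons, List.foldl_nil]
    simp only [pvZigStep]
    have hrlt : pvRowN R k < R := pvRowN_lt R k hR
    rw [Prod.mk.injEq, Prod.mk.injEq]
    refine ⟨?_, ?_, ?_⟩
    · -- rows component
      simp only [Int.toNat_natCast]
      rw [mapRange_getD _ _ _ _ hrlt, mapRange_set]
      apply List.map_congr_left
      intro j hj
      rw [List.range_succ, List.filter_append]
      by_cases hjr : j = pvRowN R k
      · subst hjr
        rw [if_pos rfl]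
        have hfk : ([k].filter (fun i => pvRowN R i == pvRowN R k)) = [k] := by simp
        rw [hfk, List.map_append]
        simp [List.getElem?_eq_getElem hk]
      · rw [if_neg hjr]
        have hfk : ([k].filter (fun i => pvRowN R i == j)) = [] := by
          simp only [List.filter_cons, List.filter_nil]
          rw [if_neg]
          simp only [beq_iff_eq]
          omega
        rw [hfk, List.append_nil]
    · -- rail component
      rw [pvDir_step R k hR, ← pvRow_step R k hR]
    · -- direction component
      rw [pvDir_step R k hR]
      unfold pvDirP
      rw [if_neg (by omega)]
      simp

----------------------------------------------------------------
-- B's sorted order is A's row-major order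
----------------------------------------------------------------

lemma insertBy_congr {α : Type} (b1 b2 : α → α → Bool) (x : α) (ys : List α)
    (h : ∀ a ∈ x :: ys, ∀ c ∈ x :: ys, b1 a c = b2 a c) :
    PySem.List.insertBy b1 x ys = PySem.List.insertBy b2 x ys := by
  induction ys with
  | nil => rfl
  | cons y ys ih =>
    show (if b1 x y then x :: y :: ys else y :: PySem.List.insertBy b1 x ys)
       = (if b2 x y then x :: y :: ys else y :: PySem.List.insertBy b2 x ys)
    rw [h x (by simp) y (by simp)]
    by_cases hb : b2 x y
    · rw [if_pos hb, if_pos hb]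
    · rw [if_neg hb, if_neg hb]
      rw [ih]
      intro a ha c hc
      apply h
      · rcases List.mem_cons.1 ha with h' | h' <;> simp [List.mem_cons, h']
      · rcases List.mem_cons.1 hc with h' | h' <;> simp [List.mem_cons, h']

lemma foldl_insertBy_congr {α : Type} (b1 b2 : α → α → Bool) (S : List α)
    (h : ∀ a ∈ S, ∀ c ∈ S, b1 a c = b2 a c) :
    ∀ (xs acc : List α), (∀ a ∈ xs, a ∈ S) → (∀ a ∈ acc, a ∈ S) →
    xs.foldl (fun acc x => PySem.List.insertBy b1 x acc) acc
      = xs.foldl (fun acc x => PySem.List.insertBy b2 x acc) acc := by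
  intro xs
  induction xs with
  | nil => intro acc _ _; rfl
  | cons x xs ih =>
    intro acc hxs hacc
    simp only [List.foldl_cons]
    have hx : x ∈ S := hxs x (by simp)
    have hmem : ∀ a ∈ x :: acc, a ∈ S := by
      intro a ha
      rcases List.mem_cons.1 ha with h' | h'
      · subst h'; exact hx
      · exact hacc a h'
    rw [insertBy_congr b1 b2 x acc (fun a ha c hc => h a (hmem a ha) c (hmem c hc))]
    refine ih _ (fun a ha => hxs a (by simp [ha])) ?_
    intro a ha
    rcases (PySem.List.mem_insertBy b2 x a acc).1 ha with h' | h'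
    · subst h'; exact hx
    · exact hacc a h'

lemma lex_combine {r1 r2 a b n : Int} (ha : 0 ≤ a) (ha2 : a < n) (hb : 0 ≤ b) (hb2 : b < n) :
    r1 * n + a < r2 * n + b ↔ (r1 < r2 ∨ (r1 = r2 ∧ a < b)) := by
  constructor
  · intro h
    rcases lt_trichotomy r1 r2 with h1 | h1 | h1
    · exact Or.inl h1
    · refine Or.inr ⟨h1, ?_⟩
      rw [h1] at h
      omega
    · exfalso
      have h2 : (r2 + 1) * n ≤ r1 * n := mul_le_mul_of_nonneg_right (by omega) (by omega)
      rw [add_mul, one_mul] at h2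
      linarith
  · rintro (h | ⟨h1, h2⟩)
    · have h3 : (r1 + 1) * n ≤ r2 * n := mul_le_mul_of_nonneg_right (by omega) (by omega)
      rw [add_mul, one_mul] at h3
      linarith
    · rw [h1]
      omega

lemma partition_perm {α : Type} (key : α → Nat) :
    ∀ (R : Nat) (xs : List α), (∀ x ∈ xs, key x < R) →
    ((List.range R).flatMap (fun r => xs.filter (fun x => key x == r))).Perm xs := by
  intro R
  induction R with
  | zero =>
    intro xs h
    cases xs with
    | nil => simp
    | cons a l => exact absurd (h a (by simp)) (Nat.not_lt_zero _)
  | succ R ih =>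
    intro xs h
    rw [List.range_succ, List.flatMap_append]
    have hsingle : ([R].flatMap (fun r => xs.filter (fun x => key x == r)))
        = xs.filter (fun x => key x == R) := by simp
    rw [hsingle]
    have hblocks : (List.range R).flatMap (fun r => xs.filter (fun x => key x == r))
        = (List.range R).flatMap
            (fun r => (xs.filter (fun x => !(key x == R))).filter (fun x => key x == r)) := by
      rw [List.flatMap_def, List.flatMap_def]
      congr 1
      apply List.map_congr_left
      intro r hr
      have hrR : r < R := List.mem_range.1 hr
      rw [List.filter_filter]
      apply List.filter_congr
      intro x hx
      by_cases hk : key x = R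
      · have hfalse : (key x == r) = false := by
          simp only [beq_eq_false_iff_ne]
          omega
        simp [hfalse]
      · have htrue : (!(key x == R)) = true := by simp [hk]
        simp [htrue]
    rw [hblocks]
    have hsub : ∀ x ∈ xs.filter (fun x => !(key x == R)), key x < R := by
      intro x hx
      rw [List.mem_filter] at hx
      have h1 := h x hx.1
      have h2 : key x ≠ R := by simpa using hx.2
      omega
    refine (List.Perm.append_right _ (ih _ hsub)).trans ?_
    exact (List.perm_append_comm).trans (List.filter_append_perm _ xs)

lemma pairwise_flatMap_range {α : Type} (Rel : α → α → Prop) (f : Nat → List α) :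
    ∀ (R : Nat), (∀ r, r < R → (f r).Pairwise Rel) →
    (∀ r s, r < s → s < R → ∀ a ∈ f r, ∀ b ∈ f s, Rel a b) →
    ((List.range R).flatMap f).Pairwise Rel := by
  intro R
  induction R with
  | zero => intro _ _; simp
  | succ R ih =>
    intro h1 h2
    rw [List.range_succ, List.flatMap_append, List.pairwise_append]
    refine ⟨ih (fun r hr => h1 r (by omega)) (fun r s hrs hsR => h2 r s hrs (by omega)), ?_, ?_⟩
    · simpa using h1 R (by omega)
    · intro a ha b hb
      rw [List.mem_flatMap] at ha
      obtain ⟨r, hr, har⟩ := ha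
      have hrR : r < R := List.mem_range.1 hr
      have hbR : b ∈ f R := by simpa using hb
      exact h2 r R hrR (by omega) a har b hbR

lemma pvRow_natCast (R j : Nat) (hR : 2 ≤ R) :
    pvRow (2 * ((R : Int) - 1)) (j : Int) = (pvRowN R j : Int) := by
  unfold pvRow pvRowN
  have hcast : (2 * ((R : Int) - 1)) = ((2 * (R - 1) : Nat) : Int) := by
    push_cast
    omega
  rw [hcast, PySem.Int.mod_natCast]
  have h2 : j % (2 * (R - 1)) < 2 * (R - 1) := Nat.mod_lt _ (by omega)
  generalize hg : j % (2 * (R - 1)) = m at h2 ⊢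
  simp only []
  omega

-- the candidate row-major listing of the indices 0..n-1
def pvYs (R n : Nat) : List Int :=
  (List.range R).flatMap
    (fun r => ((List.range n).filter (fun i => pvRowN R i == r)).map (fun i : Nat => (i : Int)))

lemma pvYs_perm (R n : Nat) (hR : 2 ≤ R) :
    (pvYs R n).Perm ((List.range n).map (fun i : Nat => (i : Int))) := by
  have hkey : ∀ x ∈ (List.range n).map (fun i : Nat => (i : Int)),
      (fun x : Int => pvRowN R x.toNat) x < R := by
    intro x _
    exact pvRowN_lt R _ hR
  have hperm := partition_perm (fun x : Int => pvRowN R x.toNat) R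
    ((List.range n).map (fun i : Nat => (i : Int))) hkey
  have heq : (List.range R).flatMap
      (fun r => ((List.range n).map (fun i : Nat => (i : Int))).filter
        (fun x => pvRowN R x.toNat == r)) = pvYs R n := by
    unfold pvYs
    rw [List.flatMap_def, List.flatMap_def]
    congr 1
    apply List.map_congr_left
    intro r _
    rw [List.filter_map]
    have hf : (List.range n).filter ((fun x : Int => pvRowN R x.toNat == r) ∘ fun i : Nat => (i : Int))
        = (List.range n).filter (fun i => pvRowN R i == r) := by
      apply List.filter_congr
      intro i _
      simp [Function.comp]
    rw [hf]
  rw [heq] at hperm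
  exact hperm

lemma pvYs_pairwise (R n : Nat) (hR : 2 ≤ R) :
    (pvYs R n).Pairwise
      (fun a b => pvRow (2 * ((R : Int) - 1)) a * (n : Int) + a
                < pvRow (2 * ((R : Int) - 1)) b * (n : Int) + b) := by
  unfold pvYs
  apply pairwise_flatMap_range
  · intro r _
    rw [List.pairwise_map]
    have hpw : ((List.range n).filter (fun i => pvRowN R i == r)).Pairwise (· < ·) :=
      List.pairwise_lt_range.sublist List.filter_sublist
    refine hpw.imp_of_mem ?_
    intro i j hi hj hij
    rw [List.mem_filter] at hi hj
    have hri : pvRowN R i = r := by simpa using hi.2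
    have hrj : pvRowN R j = r := by simpa using hj.2
    have hin : i < n := List.mem_range.1 hi.1
    have hjn : j < n := List.mem_range.1 hj.1
    rw [pvRow_natCast R i hR, pvRow_natCast R j hR, hri, hrj]
    apply (lex_combine (by omega) (by omega) (by omega) (by omega)).2
    right
    exact ⟨rfl, by omega⟩
  · intro r s hrs _ a ha b hb
    rw [List.mem_map] at ha hb
    obtain ⟨i, hi, rfl⟩ := ha
    obtain ⟨j, hj, rfl⟩ := hb
    rw [List.mem_filter] at hi hj
    have hri : pvRowN R i = r := by simpa using hi.2
    have hrj : pvRowN R j = s := by simpa using hj.2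
    have hin : i < n := List.mem_range.1 hi.1
    have hjn : j < n := List.mem_range.1 hj.1
    rw [pvRow_natCast R i hR, pvRow_natCast R j hR, hri, hrj]
    apply (lex_combine (by omega) (by omega) (by omega) (by omega)).2
    left
    exact_mod_cast hrs

lemma pyRange_zero_n (n : Nat) :
    PySem.List.pyRange 0 (n : Int) = (List.range n).map (fun i : Nat => (i : Int)) := by
  rw [PySem.List.pyRange_one]
  simp

lemma order_eq (R n : Nat) (hR : 2 ≤ R) :
    PySem.List.sorted2 (PySem.List.pyRange 0 (n : Int))
      (fun i => pvRow (2 * ((R : Int) - 1)) i) (fun i => i)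
    = pvYs R n := by
  have hpairs : ∀ a ∈ PySem.List.pyRange 0 (n : Int), ∀ c ∈ PySem.List.pyRange 0 (n : Int),
      (decide (pvRow (2 * ((R : Int) - 1)) a < pvRow (2 * ((R : Int) - 1)) c) ||
        (!decide (pvRow (2 * ((R : Int) - 1)) c < pvRow (2 * ((R : Int) - 1)) a) && decide (a < c)))
      = decide (pvRow (2 * ((R : Int) - 1)) a * (n : Int) + a
              < pvRow (2 * ((R : Int) - 1)) c * (n : Int) + c) := by
    intro a ha c hc
    rw [PySem.List.mem_pyRange_one] at ha hc
    have hiff := lex_combine (r1 := pvRow (2 * ((R : Int) - 1)) a)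
      (r2 := pvRow (2 * ((R : Int) - 1)) c) (a := a) (b := c) (n := (n : Int))
      (by omega) (by omega) (by omega) (by omega)
    rcases lt_trichotomy (pvRow (2 * ((R : Int) - 1)) a) (pvRow (2 * ((R : Int) - 1)) c)
      with h1 | h1 | h1
    · have hlt := hiff.2 (Or.inl h1)
      simp [h1, hlt]
    · by_cases h2 : a < c
      · have hlt := hiff.2 (Or.inr ⟨h1, h2⟩)
        simp [h1, h2]
      · have hnlt : ¬ (pvRow (2 * ((R : Int) - 1)) a * (n : Int) + a
            < pvRow (2 * ((R : Int) - 1)) c * (n : Int) + c) := by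
          intro hx
          rcases hiff.1 hx with h3 | ⟨_, h3⟩ <;> omega
        simp [h1, h2, hnlt] -- keep
    · have hnlt : ¬ (pvRow (2 * ((R : Int) - 1)) a * (n : Int) + a
          < pvRow (2 * ((R : Int) - 1)) c * (n : Int) + c) := by
        intro hx
        rcases hiff.1 hx with h3 | ⟨h3, _⟩ <;> omega
      simp [not_lt_of_gt h1, h1, hnlt]
  have hkey : PySem.List.sorted2 (PySem.List.pyRange 0 (n : Int))
      (fun i => pvRow (2 * ((R : Int) - 1)) i) (fun i => i)
    = PySem.List.sorted (PySem.List.pyRange 0 (n : Int))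
      (fun i => pvRow (2 * ((R : Int) - 1)) i * (n : Int) + i) := by
    rw [PySem.List.sorted_eq_foldl_insertBy]
    exact foldl_insertBy_congr
      (fun a c => decide (pvRow (2 * ((R : Int) - 1)) a < pvRow (2 * ((R : Int) - 1)) c) ||
        (!decide (pvRow (2 * ((R : Int) - 1)) c < pvRow (2 * ((R : Int) - 1)) a) && decide (a < c)))
      (fun a c => decide (pvRow (2 * ((R : Int) - 1)) a * (n : Int) + a
                        < pvRow (2 * ((R : Int) - 1)) c * (n : Int) + c))
      (PySem.List.pyRange 0 (n : Int)) hpairs _ [] (fun a ha => ha) (by simp)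
  rw [hkey]
  apply PySem.List.sorted_eq_of_perm_of_pairwise_lt
  · rw [pyRange_zero_n]
    exact pvYs_perm R n hR
  · exact pvYs_pairwise R n hR

lemma flat_eq (l : List Char) (R : Nat) (hR : 2 ≤ R) :
    ((l.foldl (pvZigStep (R : Int)) (List.replicate R [], 0, 1)).1).flatten
    = (PySem.List.sorted2 (PySem.List.pyRange 0 (l.length : Int))
        (fun i => pvRow (2 * ((R : Int) - 1)) i) (fun i => i)).map
        (fun i => PySem.List.pyGetD l i ' ') := by
  have hfold := zig_loop l R hR l.length le_rfl
  rw [List.take_length] at hfold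
  rw [hfold, order_eq R l.length hR]
  unfold pvYs
  rw [List.map_flatMap]
  show ((List.range R).map (fun r =>
      ((List.range l.length).filter (fun i => pvRowN R i == r)).map (fun i => l.getD i ' '))).flatten = _
  rw [← List.flatMap_def]
  congr 1
  funext r
  rw [List.map_map]
  apply List.map_congr_left
  intro i _
  simp [Function.comp, PySem.List.pyGetD_natCast]

-- ===== VERDICT (by name: the statement is the Claim_ definition above) =====
theorem zigzag_prime_enc_spec : Claim_equal_zigzag_prime_enc := by
  unfold Claim_equal_zigzag_prime_enc
  intro text rails _ hpre
  unfold Spec_zigzag_prime_enc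
  by_cases hne : text.toList = []
  · unfold zigzag_prime_enc zigzag_prime_enc_alt
    rw [if_pos hne, if_pos hne]
  · rcases hpre with h | hr | ⟨hlen, hrail⟩
    · exact absurd h hne
    · -- rails ≥ 2
      have hcast : ((rails.toNat : Int)) = rails := Int.toNat_of_nonneg (by omega)
      have hR2 : 2 ≤ rails.toNat := by omega
      simp only [zigzag_prime_enc, zigzag_prime_enc_alt, if_neg hne, if_pos hr]
      rw [← hcast]
      simp only [Int.toNat_natCast]
      rw [flat_eq text.toList rails.toNat hR2]
      apply congrArg String.mk
      apply stage2
      rw [List.length_map, (PySem.List.sorted2_perm _ _ _ _).length_eq,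
        PySem.List.length_pyRange_one]
      simp
    · -- single character, one rail
      obtain ⟨c, hc⟩ := List.length_eq_one_iff.1 hlen
      simp only [zigzag_prime_enc, zigzag_prime_enc_alt, hc, hrail, if_neg hne]
      rw [if_neg (show ¬ ([c] : List Char) = [] by simp),
        if_neg (show ¬ ([c] : List Char) = [] by simp),
        if_neg (show ¬ (2 : Int) ≤ 1 by norm_num)]
      have hstep : (([c] : List Char).foldl (pvZigStep 1)
          (List.replicate (1 : Int).toNat [], 0, 1)).1.flatten = [c] := by
        simp [pvZigStep]
      rw [hstep]
      exact congrArg String.mk (stage2 [c] 1 rfl)
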